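-- pv_equiv track=rewrite | github.com/lucianmot/codewars-katas | Python - Find The Parity Outlier.py | find_outlier
-- ===== SOURCE A (Python) =====
-- def find_outlier(integers):
--     sum = 0;
--     for i in integers:
--         sum += i%2
--     if sum == 1:
--         for i in integers:
--             if i%2 == 1:
--                 return i
--     else:
--         for i in integers:
--             if i%2 == 0:
--                 return i
-- ===== SOURCE B (Python) =====
-- def find_outlier(integers):
--     odd_count = 0
--     first_odd = None
--     first_even = None
--     for x in integers:
--         if x % 2:
--             odd_count += 1
--             if first_odd is None:
--                 first_odd = x
--         elif first_even is None:
--             first_even = x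
--     return first_odd if odd_count == 1 else first_even
-- ===== Notes on version B (the rewrite author's own statement) =====
-- stated objective: alternative
-- what changed: Replaces A's count-odds loop followed by a second conditional scan with ONE pass maintaining a three-field accumulator (odd count, first odd seen, first even seen) and a final selection; Pre_ excludes inputs (lists with odd-count != 1 and no even element, incl. []) on which both programs return None, which is not an int.
-- outside the precondition, e.g. on find_outlier([1, 3]): A returns None, B returns None
import Mathlib
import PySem

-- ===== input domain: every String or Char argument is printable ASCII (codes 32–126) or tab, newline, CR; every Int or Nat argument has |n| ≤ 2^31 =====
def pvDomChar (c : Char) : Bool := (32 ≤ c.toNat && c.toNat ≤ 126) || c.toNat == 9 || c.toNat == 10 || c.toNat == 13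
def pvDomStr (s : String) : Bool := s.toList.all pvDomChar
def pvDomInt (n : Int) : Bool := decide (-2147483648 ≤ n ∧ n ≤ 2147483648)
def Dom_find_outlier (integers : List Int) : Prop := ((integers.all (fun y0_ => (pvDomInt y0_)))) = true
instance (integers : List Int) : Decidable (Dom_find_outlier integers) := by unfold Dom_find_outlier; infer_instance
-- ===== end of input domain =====

-- B replaces A's count loop + conditional second scan with one pass keeping (odd count, first odd, first even) and a final selection; same O(n) cost.
-- ===== PORT A =====
def find_outlier (integers : List Int) : Int :=
  let sum := integers.foldl (fun s i => s + PySem.Int.mod i 2) 0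
  if sum = 1 then
    (integers.find? (fun i => PySem.Int.mod i 2 == 1)).getD 0
  else
    (integers.find? (fun i => PySem.Int.mod i 2 == 0)).getD 0

-- ===== PORT B =====
-- single-pass accumulator: (odd_count, first_odd, first_even)
def findOutlierStep (st : Int × Option Int × Option Int) (x : Int) : Int × Option Int × Option Int :=
  let (c, fo, fe) := st
  if PySem.Int.mod x 2 ≠ 0 then
    (c + 1, (if fo = none then some x else fo), fe)
  else
    (c, fo, (if fe = none then some x else fe))

def find_outlier_alt (integers : List Int) : Int :=
  let (c, fo, fe) := integers.foldl findOutlierStep (0, none, none)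
  if c = 1 then fo.getD 0 else fe.getD 0

-- ===== PRECONDITION & SPEC =====
-- Pre_ excludes exactly the inputs on which Python A (and B) fall through and return None (no int):
-- lists whose odd count is not 1 and which contain no even number (all-odd lists, incl. []).
def Pre_find_outlier (integers : List Int) : Prop :=
  (integers.countP (fun i => PySem.Int.mod i 2 == 1) = 1) ∨ (∃ x ∈ integers, PySem.Int.mod x 2 = 0)
instance (integers : List Int) : Decidable (Pre_find_outlier integers) := by unfold Pre_find_outlier; infer_instance
def pvWitness_find_outlier : List Int := [2, 4, 7]
def Spec_find_outlier (integers : List Int) (out : Int) : Prop := out = find_outlier_alt integers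
instance (integers : List Int) (out : Int) : Decidable (Spec_find_outlier integers out) := by unfold Spec_find_outlier; infer_instance

-- ===== CLAIM (what is proved, stated in full; the proofs are below) =====
def Claim_equal_find_outlier : Prop := ∀ (integers : List Int), Dom_find_outlier integers → Pre_find_outlier integers → Spec_find_outlier integers (find_outlier integers)

-- ===== LEMMAS AND PROOFS =====
lemma mod2_eq (a : Int) : PySem.Int.mod a 2 = a % 2 :=
  PySem.Int.mod_eq_emod_of_pos (by norm_num)

lemma mod2_ne_iff (a : Int) : (PySem.Int.mod a 2 ≠ 0) ↔ (PySem.Int.mod a 2 = 1) := by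
  rw [mod2_eq]
  rcases Int.emod_two_eq a with h | h <;> simp [h]

-- invariant of B's single pass
lemma foldl_step_eq (xs : List Int) (c : Int) (fo fe : Option Int) :
    xs.foldl findOutlierStep (c, fo, fe)
      = (c + xs.countP (fun i => PySem.Int.mod i 2 == 1),
         fo.or (xs.find? (fun i => PySem.Int.mod i 2 == 1)),
         fe.or (xs.find? (fun i => PySem.Int.mod i 2 == 0))) := by
  induction xs generalizing c fo fe with
  | nil => simp
  | cons a t ih =>
    rw [List.foldl_cons, List.countP_cons, List.find?_cons, List.find?_cons]
    by_cases h : PySem.Int.mod a 2 = 0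
    · have h1 : (PySem.Int.mod a 2 == 1) = false := by rw [h]; decide
      have h0 : (PySem.Int.mod a 2 == 0) = true := by rw [h]; decide
      rw [h1, h0]
      simp only [findOutlierStep, if_neg (not_not_intro h), ih]
      cases fe <;> simp [Option.or]
    · have h1' : PySem.Int.mod a 2 = 1 := (mod2_ne_iff a).mp h
      have h1 : (PySem.Int.mod a 2 == 1) = true := by rw [h1']; decide
      have h0 : (PySem.Int.mod a 2 == 0) = false := by rw [h1']; decide
      rw [h1, h0]
      simp only [findOutlierStep, if_pos h, ih]
      refine Prod.ext ?_ (Prod.ext ?_ ?_)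
      · simp; push_cast; ring
      · cases fo <;> simp [Option.or]
      · simp

lemma sum_mod_eq_count (xs : List Int) (acc : Int) :
    xs.foldl (fun s i => s + PySem.Int.mod i 2) acc
      = acc + xs.countP (fun i => PySem.Int.mod i 2 == 1) := by
  induction xs generalizing acc with
  | nil => simp
  | cons a t ih =>
    rw [List.foldl_cons, ih, List.countP_cons, mod2_eq]
    rcases Int.emod_two_eq a with h | h <;> rw [h] <;> simp <;> push_cast <;> ring

-- ===== VERDICT (by name: the statement is the Claim_ definition above) =====
theorem find_outlier_spec : Claim_equal_find_outlier := by
  intro xs _ _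
  show find_outlier xs = find_outlier_alt xs
  simp only [find_outlier, find_outlier_alt, sum_mod_eq_count, foldl_step_eq, zero_add,
    Option.or]
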